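-- pv_equiv track=rewrite | github.com/pranavsoni21/vulnerable-lab | web/app.py | naive_filter
-- ===== SOURCE A (Python) =====
-- def naive_filter(s: str) -> bool:
--     """Return True if input contains blacklisted tokens (simple heuristic)."""
--     if not s:
--         return False
--     # naive blacklist (intentionally incomplete)
--     blacklist = [
--         "--", ";", "/*", "*/", "drop ", "insert ", "update ", "delete ",
--         "union ", "select ", "alter ", "exec ", "xp_", " and ", "or"
--         "0x", "char(", "cast(", "convert("
--     ]
--     low = s.lower()
--     for token in blacklist:
--         if token in low:
--             return True
--     return False
-- ===== SOURCE B (Python) =====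
-- def naive_filter(s: str) -> bool:
--     """Return True if input contains blacklisted tokens (simple heuristic)."""
--     if not s:
--         return False
--     tokens = (
--         "--", ";", "/*", "*/", "drop ", "insert ", "update ", "delete ",
--         "union ", "select ", "alter ", "exec ", "xp_", " and ", "or0x",
--         "char(", "cast(", "convert(",
--     )
--     low = s.lower()
--     return any(low.startswith(t, i) for i in range(len(low)) for t in tokens)
-- ===== Notes on version B (the rewrite author's own statement) =====
-- stated objective: alternative
-- what changed: Replaces the token-major loop of full substring scans ('token in low' per blacklist entry, early return) with a single position-major sweep: one pass over the string's positions, checking at each position whether any token starts there.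
import Mathlib
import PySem

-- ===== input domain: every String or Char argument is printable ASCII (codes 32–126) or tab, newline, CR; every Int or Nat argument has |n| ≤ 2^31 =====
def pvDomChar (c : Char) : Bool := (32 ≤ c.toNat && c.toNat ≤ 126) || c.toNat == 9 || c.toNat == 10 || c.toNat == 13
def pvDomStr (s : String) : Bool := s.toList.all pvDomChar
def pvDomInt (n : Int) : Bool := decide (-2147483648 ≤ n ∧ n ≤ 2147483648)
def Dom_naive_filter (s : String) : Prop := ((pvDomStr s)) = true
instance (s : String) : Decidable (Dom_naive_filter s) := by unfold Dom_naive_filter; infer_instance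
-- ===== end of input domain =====

-- B replaces A's token-major loop of substring scans by one position-major sweep
-- checking which token starts at each position (objective: alternative, same cost).

-- ===== PORT A =====
-- A's blacklist; "or" "0x" are adjacent string literals in the Python source, so they
-- concatenate to the single token "or0x".
def pvBlacklistA : List String :=
  ["--", ";", "/*", "*/", "drop ", "insert ", "update ", "delete ",
   "union ", "select ", "alter ", "exec ", "xp_", " and ", "or0x",
   "char(", "cast(", "convert("]

-- the 'for token in blacklist: if token in low: return True' loop
def pvLoopA (low : String) : List String → Bool
  | [] => false
  | t :: rest => if PySem.Str.isIn t low then true else pvLoopA low rest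

def naive_filter (s : String) : Bool :=
  if s.toList.isEmpty then false
  else pvLoopA (PySem.Str.lower s) pvBlacklistA

-- ===== PORT B =====
-- Source B's token tuple has exactly the entries of pvBlacklistA; the shared constant avoids a duplicate literal.
def pvTokensB : List String := pvBlacklistA

-- any(low.startswith(t, i) for i in range(len(low)) for t in tokens):
-- low.startswith(t, i) with 0 ≤ i < len(low) is "t is a prefix of low[i:]".
def naive_filter_alt (s : String) : Bool :=
  if s.toList.isEmpty then false
  else
    let low := (PySem.Str.lower s).toList
    (List.range low.length).any fun i =>
      pvTokensB.any fun t => PySem.Chars.startswith (low.drop i) t.toList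

-- ===== PRECONDITION & SPEC =====
def Spec_naive_filter (s : String) (out : Bool) : Prop := out = naive_filter_alt s
instance (s : String) (out : Bool) : Decidable (Spec_naive_filter s out) := by unfold Spec_naive_filter; infer_instance

-- ===== CLAIM (what is proved, stated in full; the proofs are below) =====
def Claim_equal_naive_filter : Prop := ∀ (s : String), Dom_naive_filter s → Spec_naive_filter s (naive_filter s)

-- ===== LEMMAS AND PROOFS =====

-- A's early-return loop is List.any of the membership test
theorem pvLoopA_eq_any (low : String) (ts : List String) :
    pvLoopA low ts = ts.any fun t => PySem.Str.isIn t low := by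
  induction ts with
  | nil => rfl
  | cons t rest ih =>
      rw [pvLoopA, ih, List.any_cons]
      split_ifs with h <;> rw [PySem.Str.isIn_eq] at h <;> simp [h]

-- for a nonempty token, containment is "starts at some position i < length"
theorem pv_isIn_iff_pos (tl low : List Char) (hne : tl ≠ []) :
    PySem.Chars.isIn tl low = true ↔ ∃ i < low.length, tl <+: low.drop i := by
  rw [← PySem.Chars.exists_prefix_drop_iff_isIn]
  constructor
  · rintro ⟨j, hj⟩
    refine ⟨j, ?_, hj⟩
    by_contra h
    have : low.drop j = [] := List.drop_eq_nil_of_le (by omega)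
    rw [this, List.prefix_nil] at hj
    exact hne hj
  · rintro ⟨i, _, hi⟩; exact ⟨i, hi⟩

theorem naive_filter_eq_alt (s : String) : naive_filter s = naive_filter_alt s := by
  unfold naive_filter naive_filter_alt
  split_ifs with h
  · rfl
  · rw [pvLoopA_eq_any]
    simp only [pvBlacklistA, pvTokensB]
    rw [Bool.eq_iff_iff]
    simp only [List.any_eq_true, List.mem_range]
    constructor
    · rintro ⟨t, ht, hin⟩
      have hne : t.toList ≠ [] := by
        fin_cases ht <;> decide
      rw [PySem.Str.isIn_eq, pv_isIn_iff_pos _ _ hne] at hin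
      obtain ⟨i, hi, hpre⟩ := hin
      exact ⟨i, hi, t, ht, (PySem.Chars.startswith_iff _ _).mpr hpre⟩
    · rintro ⟨i, hi, t, ht, hsw⟩
      refine ⟨t, ht, ?_⟩
      have hne : t.toList ≠ [] := by
        fin_cases ht <;> decide
      rw [PySem.Str.isIn_eq, pv_isIn_iff_pos _ _ hne]
      exact ⟨i, hi, (PySem.Chars.startswith_iff _ _).mp hsw⟩

-- ===== VERDICT (by name: the statement is the Claim_ definition above) =====
theorem naive_filter_spec : Claim_equal_naive_filter := by
  intro s _
  exact naive_filter_eq_alt s
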